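-- pv_equiv track=rewrite | github.com/GraceHanJiarui/Companion-AI | paper_shared_manifold_m3_lite.py | group_case_indices
-- ===== SOURCE A (Python) =====
-- from typing import Any
--
-- def group_case_indices(samples: list[dict[str, Any]]) -> dict[str, list[int]]:
--     by_case: dict[str, list[tuple[int, int]]] = {}
--     for idx, sample in enumerate(samples):
--         by_case.setdefault(str(sample["case_id"]), []).append((int(sample["turn_idx"]), idx))
--     out: dict[str, list[int]] = {}
--     for case_id, seq in by_case.items():
--         seq.sort()
--         out[case_id] = [idx for _, idx in seq]
--     return out
-- ===== SOURCE B (Python) =====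
-- from typing import Any
--
-- def group_case_indices(samples: list[dict[str, Any]]) -> dict[str, list[int]]:
--     # Seed the output keys in first-occurrence order, then do ONE global stable
--     # sort of all indices by turn_idx and distribute them into their buckets
--     # (stability keeps ascending-index order on equal turns, like A's pair sort).
--     out: dict[str, list[int]] = {}
--     for sample in samples:
--         out.setdefault(str(sample["case_id"]), [])
--     order = sorted(range(len(samples)), key=lambda i: int(samples[i]["turn_idx"]))
--     for i in order:
--         out[str(samples[i]["case_id"])].append(i)
--     return out
-- ===== Notes on version B (the rewrite author's own statement) =====
-- stated objective: alternative
-- what changed: B replaces A's group-then-sort-each-bucket with a key-seeding pass followed by one global stable sort of all indices by turn_idx that is distributed into the buckets.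
import Mathlib
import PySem

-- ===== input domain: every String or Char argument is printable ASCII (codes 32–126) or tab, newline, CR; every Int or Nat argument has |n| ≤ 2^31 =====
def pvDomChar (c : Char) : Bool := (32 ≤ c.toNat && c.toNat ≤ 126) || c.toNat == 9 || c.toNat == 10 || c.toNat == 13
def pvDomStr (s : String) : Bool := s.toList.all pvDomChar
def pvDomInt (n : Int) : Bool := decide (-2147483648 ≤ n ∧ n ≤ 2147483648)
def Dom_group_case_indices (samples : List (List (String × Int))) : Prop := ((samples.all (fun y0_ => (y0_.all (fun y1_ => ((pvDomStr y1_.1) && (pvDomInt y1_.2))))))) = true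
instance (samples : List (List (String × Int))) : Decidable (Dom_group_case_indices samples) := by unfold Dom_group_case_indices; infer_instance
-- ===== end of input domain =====

-- B groups the same samples by case_id but replaces A's "group pairs, then sort each
-- bucket" with "seed the key order, sort ALL indices once (stably) by turn_idx, then
-- distribute"; equivalence of the two returned dicts is proved on inputs where the
-- Python programs return (both raise KeyError when a sample lacks a key — Pre_ below).

-- shared lookup helpers: str(sample["case_id"]) and int(sample["turn_idx"]) (first-match
-- assoc-list lookup; the default 0 is never reached under Pre_, which demands both keys)
def pvKeyOf (s : List (String × Int)) : String :=
  PySem.Int.toStr ((PySem.Dict.mk s).getD "case_id" 0)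
def pvTurnOf (s : List (String × Int)) : Int :=
  (PySem.Dict.mk s).getD "turn_idx" 0

-- ===== PORT A =====
def group_case_indices (samples : List (List (String × Int))) : List (String × List Int) :=
  let by_case : PySem.Dict String (List (Int × Int)) :=
    (PySem.List.enumerate samples).foldl
      (fun d p => d.modify (pvKeyOf p.2) [] (fun seq => seq ++ [(pvTurnOf p.2, p.1)]))
      PySem.Dict.empty
  let out : PySem.Dict String (List Int) :=
    by_case.items.foldl
      (fun o kv => o.insert kv.1
        ((PySem.List.sorted2 kv.2 (fun q => q.1) (fun q => q.2)).map (fun q => q.2)))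
      PySem.Dict.empty
  out.items

-- ===== PORT B =====
def group_case_indices_alt (samples : List (List (String × Int))) : List (String × List Int) :=
  let out0 : PySem.Dict String (List Int) :=
    samples.foldl (fun d s => d.setdefault (pvKeyOf s) []) PySem.Dict.empty
  let order : List Int :=
    PySem.List.sorted (PySem.List.pyRange 0 (PySem.List.len samples))
      (fun i => pvTurnOf (PySem.List.pyGetD samples i []))
  let out : PySem.Dict String (List Int) :=
    order.foldl
      (fun d i => d.modify (pvKeyOf (PySem.List.pyGetD samples i [])) [] (fun l => l ++ [i]))
      out0
  out.items

-- ===== PRECONDITION & SPEC =====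
-- Pre_ excludes exactly the inputs on which the Python A raises KeyError: a sample
-- missing the "case_id" or "turn_idx" key (B raises there too).
def Pre_group_case_indices (samples : List (List (String × Int))) : Prop :=
  (samples.all (fun s =>
    (PySem.Dict.mk s).contains "case_id" && (PySem.Dict.mk s).contains "turn_idx")) = true
instance (samples : List (List (String × Int))) : Decidable (Pre_group_case_indices samples) := by
  unfold Pre_group_case_indices; infer_instance
def pvWitness_group_case_indices : (List (List (String × Int))) :=
  [[("case_id", 1), ("turn_idx", 2)], [("case_id", 1), ("turn_idx", 0)]]

def Spec_group_case_indices (samples : List (List (String × Int))) (out : List (String × List Int)) : Prop := out = group_case_indices_alt samples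
instance (samples : List (List (String × Int))) (out : List (String × List Int)) : Decidable (Spec_group_case_indices samples out) := by unfold Spec_group_case_indices; infer_instance

-- ===== CLAIM (what is proved, stated in full; the proofs are below) =====
def Claim_equal_group_case_indices : Prop := ∀ (samples : List (List (String × Int))), Dom_group_case_indices samples → Pre_group_case_indices samples → Spec_group_case_indices samples (group_case_indices samples)

-- ===== LEMMAS AND PROOFS =====

-- proof-side abbreviations: key and turn of the i-th sample
def pvKey (samples : List (List (String × Int))) (i : Int) : String :=
  pvKeyOf (PySem.List.pyGetD samples i [])
def pvTurn (samples : List (List (String × Int))) (i : Int) : Int :=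
  pvTurnOf (PySem.List.pyGetD samples i [])

-- inserting with pointwise-equal predicates (on the list's members) is the same
theorem pv_insertBy_congr {α : Type} (b1 b2 : α → α → Bool) (x : α) :
    ∀ ys : List α, (∀ y ∈ ys, b1 x y = b2 x y) →
      PySem.List.insertBy b1 x ys = PySem.List.insertBy b2 x ys := by
  intro ys
  induction ys with
  | nil => intro _; rfl
  | cons y ys ih =>
    intro h
    simp only [PySem.List.insertBy, h y (by simp)]
    by_cases hb : b2 x y = true
    · simp [hb]
    · simp [hb, ih (fun z hz => h z (by simp [hz]))]

-- two insert-sort folds agree when the predicates agree on every pair the fold compares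
theorem pv_foldl_insertBy_congr {α : Type} (b1 b2 : α → α → Bool) :
    ∀ (l acc : List α), (∀ x ∈ l, ∀ y ∈ acc, b1 x y = b2 x y) →
      l.Pairwise (fun a b => b1 b a = b2 b a) →
      l.foldl (fun acc x => PySem.List.insertBy b1 x acc) acc
        = l.foldl (fun acc x => PySem.List.insertBy b2 x acc) acc := by
  intro l
  induction l with
  | nil => intro acc _ _; rfl
  | cons x l ih =>
    intro acc hacc hpw
    have hx : PySem.List.insertBy b1 x acc = PySem.List.insertBy b2 x acc :=
      pv_insertBy_congr b1 b2 x acc (hacc x (by simp))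
    have hpw' := (List.pairwise_cons.mp hpw)
    simp only [List.foldl_cons, hx]
    exact ih (PySem.List.insertBy b2 x acc)
      (fun z hz y hy => by
        rcases (PySem.List.mem_insertBy b2 x y acc).mp hy with rfl | hy'
        · exact hpw'.1 z hz
        · exact hacc z (by simp [hz]) y hy')
      hpw'.2

-- sorting pairs by the tuple key (fst, snd) is sorting by the lexicographic key
theorem pv_sorted2_eq_sorted_lex (xs : List (Int × Int)) :
    PySem.List.sorted2 xs (fun q => q.1) (fun q => q.2)
      = PySem.List.sorted xs (fun q => toLex q) := by
  have hpred : (fun (a b : Int × Int) =>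
      (decide (a.1 < b.1) || (!decide (b.1 < a.1) && decide (a.2 < b.2))))
      = (fun (a b : Int × Int) => decide (toLex a < toLex b)) := by
    funext a b
    by_cases h1 : a.1 < b.1 <;> by_cases h2 : b.1 < a.1 <;> by_cases h3 : a.2 < b.2 <;>
      simp [h1, h2, h3, Prod.Lex.lt_iff] <;> omega
  show xs.foldl (fun acc x => PySem.List.insertBy _ x acc) [] =
       xs.foldl (fun acc x => PySem.List.insertBy _ x acc) []
  rw [hpred]

-- the setdefault pass never changes a getD-with-[]-default lookup
theorem pv_setdefault_fold_getD (l : List (List (String × Int))) :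
    ∀ (d : PySem.Dict String (List Int)) (c : String),
      (l.foldl (fun d s => d.setdefault (pvKeyOf s) []) d).getD c [] = d.getD c [] := by
  induction l with
  | nil => intro d c; rfl
  | cons s l ih =>
    intro d c
    simp only [List.foldl_cons, ih]
    by_cases hc : c = pvKeyOf s
    · subst hc; exact PySem.Dict.getD_setdefault_self d _ _ _
    · rw [PySem.Dict.getD_eq_get?_getD, PySem.Dict.get?_setdefault_of_ne d _ hc,
        ← PySem.Dict.getD_eq_get?_getD]

-- the setdefault pass accumulates exactly the set of keys
theorem pv_setdefault_fold_keys (l : List (List (String × Int))) :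
    ∀ d : PySem.Dict String (List Int),
      (l.foldl (fun d s => d.setdefault (pvKeyOf s) []) d).keys
        = PySem.Set.update d.keys (l.map pvKeyOf) := by
  induction l with
  | nil => intro d; rfl
  | cons s l ih =>
    intro d
    simp only [List.foldl_cons, List.map_cons, PySem.Set.update, List.foldl_cons, ih]
    have : (d.setdefault (pvKeyOf s) []).keys = PySem.Set.add d.keys (pvKeyOf s) := by
      rw [PySem.Dict.keys_setdefault]
      by_cases hk : (pvKeyOf s) ∈ d.keys
      · simp [PySem.Set.add, PySem.Set.contains, hk,
          (PySem.Dict.contains_iff_mem_keys d _).mpr hk]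
      · have : d.contains (pvKeyOf s) = false := by
          rw [← Bool.not_eq_true]; exact fun h => hk ((PySem.Dict.contains_iff_mem_keys d _).mp h)
        simp [PySem.Set.add, PySem.Set.contains, hk, this]
    rw [this]

-- Set.update with already-present elements is a no-op
theorem pv_set_update_of_subset {α : Type} [BEq α] [LawfulBEq α] :
    ∀ (xs : List α) (s : PySem.Set α), (∀ x ∈ xs, x ∈ s) → PySem.Set.update s xs = s := by
  intro xs
  induction xs with
  | nil => intro s _; rfl
  | cons x xs ih =>
    intro s h
    have hx : PySem.Set.add s x = s := by
      simp [PySem.Set.add, PySem.Set.contains, h x (by simp)]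
    simp only [PySem.Set.update, List.foldl_cons, hx]
    exact ih s (fun z hz => h z (by simp [hz]))

-- membership in the range of valid indices identifies the sample
theorem pv_mem_range_key (samples : List (List (String × Int))) (i : Int)
    (hi : i ∈ PySem.List.pyRange 0 (PySem.List.len samples)) :
    pvKey samples i ∈ samples.map pvKeyOf := by
  have h := PySem.List.mem_pyRange_one.mp hi
  have hlt : i.toNat < samples.length := by
    simp only [PySem.List.len] at h; omega
  have : PySem.List.pyGetD samples i [] = samples[i.toNat] := by
    rw [PySem.List.pyGetD_of_nonneg samples [] h.1, List.getD_eq_getElem samples [] hlt]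
  simp only [pvKey, this]
  exact List.mem_map.mpr ⟨samples[i.toNat], List.getElem_mem hlt, rfl⟩

-- the global order: sorted by turn alone equals sorted by the (turn, index) lex key
def pvOrder (samples : List (List (String × Int))) : List Int :=
  PySem.List.sorted (PySem.List.pyRange 0 (PySem.List.len samples)) (fun i => pvTurn samples i)

theorem pv_range_pairwise_lt (samples : List (List (String × Int))) :
    (PySem.List.pyRange 0 (PySem.List.len samples)).Pairwise (· < ·) := by
  rw [PySem.List.len, PySem.List.pyRange_zero_natCast]
  exact (List.pairwise_lt_range).map _ (fun a b h => by exact_mod_cast h)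

theorem pv_order_eq_sorted_lex (samples : List (List (String × Int))) :
    pvOrder samples = PySem.List.sorted (PySem.List.pyRange 0 (PySem.List.len samples))
      (fun i => toLex (pvTurn samples i, i)) := by
  show (PySem.List.pyRange 0 (PySem.List.len samples)).foldl _ [] = _
  apply pv_foldl_insertBy_congr
  · intro x _ y hy; cases hy
  · apply (pv_range_pairwise_lt samples).imp
    intro a b hab
    by_cases h1 : pvTurn samples b < pvTurn samples a
    · simp [h1, Prod.Lex.lt_iff]
    · simp [h1, Prod.Lex.lt_iff]
      omega

theorem pv_order_pairwise (samples : List (List (String × Int))) :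
    (pvOrder samples).Pairwise
      (fun a b => toLex (pvTurn samples a, a) < toLex (pvTurn samples b, b)) := by
  have hperm : (pvOrder samples).Perm (PySem.List.pyRange 0 (PySem.List.len samples)) :=
    PySem.List.sorted_perm _ _ _
  have hnd : (pvOrder samples).Nodup :=
    hperm.nodup_iff.mpr ((pv_range_pairwise_lt samples).imp (fun h => ne_of_lt h))
  have hle : (pvOrder samples).Pairwise
      (fun a b => toLex (pvTurn samples a, a) ≤ toLex (pvTurn samples b, b)) := by
    rw [pv_order_eq_sorted_lex]
    exact PySem.List.sorted_pairwise _ _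
  exact (hle.and hnd).imp (fun h => lt_of_le_of_ne h.1
    (fun he => h.2 (congrArg (fun x => (ofLex x).2) he)))

theorem pv_bucket_eq (samples : List (List (String × Int))) (c : String) :
    ((PySem.List.sorted2
        ((((PySem.List.enumerate samples).map
            (fun p => (pvKeyOf p.2, (pvTurnOf p.2, p.1)))).filter (fun p => p.1 == c)).map (fun p => p.2))
        (fun q => q.1) (fun q => q.2)).map (fun q => q.2))
      = (pvOrder samples).filter (fun i => pvKey samples i == c) := by
  have henum : (PySem.List.enumerate samples).map (fun p => (pvKeyOf p.2, (pvTurnOf p.2, p.1)))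
      = (PySem.List.pyRange 0 (PySem.List.len samples)).map
          (fun j => (pvKey samples j, (pvTurn samples j, j))) := by
    rw [PySem.List.enumerate_eq_map_pyRange samples [], List.map_map]
    rfl
  rw [henum, List.filter_map, List.map_map]
  have hcomp : ∀ (l : List Int),
      l.map ((fun (p : String × Int × Int) => p.2) ∘ fun j => (pvKey samples j, (pvTurn samples j, j)))
        = l.map (fun j => (pvTurn samples j, j)) := fun l => rfl
  rw [hcomp]
  have hpred : ((fun (p : String × Int × Int) => p.1 == c) ∘ fun j => (pvKey samples j, (pvTurn samples j, j)))
      = (fun i => pvKey samples i == c) := rfl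
  rw [hpred, pv_sorted2_eq_sorted_lex]
  have hperm : (((pvOrder samples).filter (fun i => pvKey samples i == c)).map
        (fun j => ((pvTurn samples j, j) : Int × Int))).Perm
      (((PySem.List.pyRange 0 (PySem.List.len samples)).filter (fun i => pvKey samples i == c)).map
        (fun j => (pvTurn samples j, j))) :=
    (((PySem.List.sorted_perm _ _ _).filter _).map _)
  have hpw : (((pvOrder samples).filter (fun i => pvKey samples i == c)).map
        (fun j => ((pvTurn samples j, j) : Int × Int))).Pairwise
      (fun a b => toLex a < toLex b) :=
    List.pairwise_map.mpr ((pv_order_pairwise samples).filter _)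
  rw [PySem.List.sorted_eq_of_perm_of_pairwise_lt _ _ _ hperm hpw, List.map_map]
  have : ((fun (q : Int × Int) => q.2) ∘ fun j => ((pvTurn samples j, j) : Int × Int)) = id := rfl
  rw [this, List.map_id]

theorem pv_main (samples : List (List (String × Int))) :
    group_case_indices samples = group_case_indices_alt samples := by
  simp only [group_case_indices, group_case_indices_alt]
  -- ---- A side ----
  have hmapkeys : (PySem.List.enumerate samples).map (fun p => pvKeyOf p.2)
      = samples.map pvKeyOf := by
    conv_rhs => rw [← PySem.List.map_snd_enumerate samples 0, List.map_map]
    rfl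
  have hAkeys : ((PySem.List.enumerate samples).foldl
      (fun d p => d.modify (pvKeyOf p.2) [] (fun seq => seq ++ [(pvTurnOf p.2, p.1)]))
      PySem.Dict.empty).keys = PySem.Set.ofList (samples.map pvKeyOf) := by
    rw [PySem.Dict.keys_foldl_modify_key (PySem.List.enumerate samples)
        (fun p => pvKeyOf p.2) [] (fun d p => fun seq => seq ++ [(pvTurnOf p.2, p.1)])
        PySem.Dict.empty, PySem.Dict.keys_empty, hmapkeys, PySem.Set.ofList_eq_foldl]
    rfl
  have hAnodup : ((PySem.List.enumerate samples).foldl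
      (fun d p => d.modify (pvKeyOf p.2) [] (fun seq => seq ++ [(pvTurnOf p.2, p.1)]))
      PySem.Dict.empty).keys.Nodup := by
    rw [hAkeys]; exact PySem.Set.nodup_ofList _
  have hAgetD : ∀ c, ((PySem.List.enumerate samples).foldl
      (fun d p => d.modify (pvKeyOf p.2) [] (fun seq => seq ++ [(pvTurnOf p.2, p.1)]))
      PySem.Dict.empty).getD c []
      = (((PySem.List.enumerate samples).map
          (fun p => (pvKeyOf p.2, (pvTurnOf p.2, p.1)))).filter (fun p => p.1 == c)).map
          (fun p => p.2) := by
    intro c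
    have hAfused : ((PySem.List.enumerate samples).map
        (fun p => (pvKeyOf p.2, (pvTurnOf p.2, p.1)))).foldl
        (fun (d : PySem.Dict String (List (Int × Int))) q => d.modify q.1 [] (fun x => x ++ [q.2]))
        PySem.Dict.empty
      = (PySem.List.enumerate samples).foldl
        (fun d p => d.modify (pvKeyOf p.2) [] (fun seq => seq ++ [(pvTurnOf p.2, p.1)]))
        PySem.Dict.empty := by
      rw [List.foldl_map]
    rw [← hAfused, PySem.Dict.getD_foldl_modify_append, PySem.Dict.getD_empty, List.nil_append]
  -- ---- B side ----
  have hB0keys : (samples.foldl (fun d s => d.setdefault (pvKeyOf s) [])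
      (PySem.Dict.empty : PySem.Dict String (List Int))).keys
      = PySem.Set.ofList (samples.map pvKeyOf) := by
    rw [pv_setdefault_fold_keys, PySem.Dict.keys_empty, PySem.Set.ofList_eq_foldl]
    rfl
  have hmemorder : ∀ i ∈ PySem.List.sorted (PySem.List.pyRange 0 (PySem.List.len samples))
      (fun i => pvTurnOf (PySem.List.pyGetD samples i [])),
      pvKey samples i ∈ samples.map pvKeyOf := by
    intro i hi
    exact pv_mem_range_key samples i ((PySem.List.sorted_perm _ _ _).mem_iff.mp hi)
  have hBkeys : ((PySem.List.sorted (PySem.List.pyRange 0 (PySem.List.len samples))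
        (fun i => pvTurnOf (PySem.List.pyGetD samples i []))).foldl
      (fun d i => d.modify (pvKeyOf (PySem.List.pyGetD samples i [])) [] (fun l => l ++ [i]))
      (samples.foldl (fun d s => d.setdefault (pvKeyOf s) []) PySem.Dict.empty)).keys
      = PySem.Set.ofList (samples.map pvKeyOf) := by
    rw [PySem.Dict.keys_foldl_modify_key _ (fun i => pvKeyOf (PySem.List.pyGetD samples i []))
        [] (fun d i => fun l => l ++ [i]) _, hB0keys]
    apply pv_set_update_of_subset
    intro x hx
    rcases List.mem_map.mp hx with ⟨i, hi, rfl⟩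
    exact (PySem.Set.mem_ofList _ _).mpr (hmemorder i hi)
  have hBnodup : ((PySem.List.sorted (PySem.List.pyRange 0 (PySem.List.len samples))
        (fun i => pvTurnOf (PySem.List.pyGetD samples i []))).foldl
      (fun d i => d.modify (pvKeyOf (PySem.List.pyGetD samples i [])) [] (fun l => l ++ [i]))
      (samples.foldl (fun d s => d.setdefault (pvKeyOf s) []) PySem.Dict.empty)).keys.Nodup := by
    rw [hBkeys]; exact PySem.Set.nodup_ofList _
  have hBgetD : ∀ c, ((PySem.List.sorted (PySem.List.pyRange 0 (PySem.List.len samples))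
        (fun i => pvTurnOf (PySem.List.pyGetD samples i []))).foldl
      (fun d i => d.modify (pvKeyOf (PySem.List.pyGetD samples i [])) [] (fun l => l ++ [i]))
      (samples.foldl (fun d s => d.setdefault (pvKeyOf s) []) PySem.Dict.empty)).getD c []
      = (pvOrder samples).filter (fun i => pvKey samples i == c) := by
    intro c
    have hBfused : ((PySem.List.sorted (PySem.List.pyRange 0 (PySem.List.len samples))
          (fun i => pvTurnOf (PySem.List.pyGetD samples i []))).map
        (fun i => (pvKeyOf (PySem.List.pyGetD samples i []), i))).foldl
        (fun (d : PySem.Dict String (List Int)) q => d.modify q.1 [] (fun x => x ++ [q.2]))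
        (samples.foldl (fun d s => d.setdefault (pvKeyOf s) []) PySem.Dict.empty)
      = (PySem.List.sorted (PySem.List.pyRange 0 (PySem.List.len samples))
          (fun i => pvTurnOf (PySem.List.pyGetD samples i []))).foldl
        (fun d i => d.modify (pvKeyOf (PySem.List.pyGetD samples i [])) [] (fun l => l ++ [i]))
        (samples.foldl (fun d s => d.setdefault (pvKeyOf s) []) PySem.Dict.empty) := by
      rw [List.foldl_map]
    rw [← hBfused, PySem.Dict.getD_foldl_modify_append, pv_setdefault_fold_getD,
      PySem.Dict.getD_empty, List.nil_append, List.filter_map, List.map_map]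
    simp [pvOrder, pvKey, pvTurn, Function.comp_def]
  -- ---- assemble: both item lists are maps over the same key list ----
  set bc := (PySem.List.enumerate samples).foldl
      (fun d p => d.modify (pvKeyOf p.2) [] (fun seq => seq ++ [(pvTurnOf p.2, p.1)]))
      PySem.Dict.empty with hbc
  set outB := (PySem.List.sorted (PySem.List.pyRange 0 (PySem.List.len samples))
        (fun i => pvTurnOf (PySem.List.pyGetD samples i []))).foldl
      (fun d i => d.modify (pvKeyOf (PySem.List.pyGetD samples i [])) [] (fun l => l ++ [i]))
      (samples.foldl (fun d s => d.setdefault (pvKeyOf s) []) PySem.Dict.empty) with houtB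
  have h2 : (bc.items.map (fun kv => kv.1)).Nodup := hAnodup
  have hAitems := PySem.Dict.items_foldl_insert_fresh bc.items (fun kv => kv.1)
      (fun kv => ((PySem.List.sorted2 kv.2 (fun q => q.1) (fun q => q.2)).map (fun q => q.2)))
      PySem.Dict.empty (fun a _ => PySem.Dict.contains_empty a.1) h2
  beta_reduce at hAitems
  rw [hAitems, show (PySem.Dict.empty : PySem.Dict String (List Int)).items = [] from rfl,
    List.nil_append, PySem.Dict.items_eq_map_keys bc hAnodup [],
    PySem.Dict.items_eq_map_keys outB hBnodup [], List.map_map, hAkeys, hBkeys]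
  apply List.map_congr_left
  intro c _
  simp only [Function.comp_def]
  rw [hAgetD c, hBgetD c, pv_bucket_eq samples c]

-- ===== VERDICT (by name: the statement is the Claim_ definition above) =====
theorem group_case_indices_spec : Claim_equal_group_case_indices := by
  intro samples _ _
  show _ = _
  exact pv_main samples
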